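-- pv_equiv track=rewrite | github.com/welcomemyworld/TradingAgents | tradingagents/agents/managers/investment_orchestrator.py | _sanitize_capability_additions
-- ===== SOURCE A (Python) =====
-- from typing import Any, Dict, Iterable, List
--
-- def _sanitize_capability_additions(
--     requested_additions: Iterable[str] | None,
--     reserve_capabilities: Iterable[str],
-- ) -> List[str]:
--     reserve = set(reserve_capabilities)
--     additions = []
--     for analyst_key in requested_additions or []:
--         if analyst_key in reserve and analyst_key not in additions:
--             additions.append(analyst_key)
--     return additions
-- ===== SOURCE B (Python) =====
-- def _sanitize_capability_additions(requested_additions, reserve_capabilities):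
--     reserve = set(reserve_capabilities)
--     pending = list(requested_additions or [])
--     result = []
--     while pending:
--         head, rest = pending[0], pending[1:]
--         if head in reserve:
--             result.append(head)
--             pending = [x for x in rest if x != head]
--         else:
--             pending = rest
--     return result
-- ===== Notes on version B (the rewrite author's own statement) =====
-- stated objective: alternative
-- what changed: Replaces A's seen-membership accumulator loop (scan the growing result for each item) with a rewriting worklist: pop the head, emit it if it is in the reserve set, and delete all its later occurrences from the remaining worklist, so no lookup in the result ever happens.
import Mathlib
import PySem

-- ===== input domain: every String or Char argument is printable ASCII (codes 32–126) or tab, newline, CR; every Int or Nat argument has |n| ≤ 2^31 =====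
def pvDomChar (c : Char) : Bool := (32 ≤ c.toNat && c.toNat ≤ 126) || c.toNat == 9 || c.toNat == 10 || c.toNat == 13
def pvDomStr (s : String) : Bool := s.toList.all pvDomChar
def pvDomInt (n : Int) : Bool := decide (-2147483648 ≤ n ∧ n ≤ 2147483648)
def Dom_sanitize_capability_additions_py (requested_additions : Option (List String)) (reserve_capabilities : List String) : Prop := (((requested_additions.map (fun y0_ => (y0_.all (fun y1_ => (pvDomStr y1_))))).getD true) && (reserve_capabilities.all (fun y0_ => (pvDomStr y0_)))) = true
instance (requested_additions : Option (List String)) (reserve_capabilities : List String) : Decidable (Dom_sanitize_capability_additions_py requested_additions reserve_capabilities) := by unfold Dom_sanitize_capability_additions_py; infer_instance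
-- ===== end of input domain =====

-- ===== PORT A =====
-- B replaces A's seen-membership accumulator loop by a worklist that deletes later duplicates of each emitted head (alternative decomposition, same cost).
def sanitize_capability_additions_py (requested_additions : Option (List String)) (reserve_capabilities : List String) : List String :=
  let reserve : PySem.Set String := PySem.Set.ofList reserve_capabilities
  (requested_additions.getD []).foldl
    (fun additions analyst_key =>
      if reserve.contains analyst_key && !(additions.contains analyst_key) then
        additions ++ [analyst_key]
      else additions)
    []

-- ===== PORT B =====
-- the while loop of Source B: a pending worklist and a result accumulator; emitting a head
-- deletes all its later occurrences from the worklist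
def pvBLoop (reserve : PySem.Set String) (pending : List String) (result : List String) : List String :=
  match pending with
  | [] => result
  | head :: rest =>
    if reserve.contains head then
      pvBLoop reserve (rest.filter (fun x => x != head)) (result ++ [head])
    else
      pvBLoop reserve rest result
termination_by pending.length
decreasing_by
  · simpa using Nat.lt_succ_of_le (List.length_filter_le _ _)
  · exact Nat.lt_succ_self _

def sanitize_capability_additions_py_alt (requested_additions : Option (List String)) (reserve_capabilities : List String) : List String :=
  let reserve : PySem.Set String := PySem.Set.ofList reserve_capabilities
  pvBLoop reserve (requested_additions.getD []) []

-- ===== PRECONDITION & SPEC =====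
def Spec_sanitize_capability_additions_py (requested_additions : Option (List String)) (reserve_capabilities : List String) (out : List String) : Prop := out = sanitize_capability_additions_py_alt requested_additions reserve_capabilities
instance (requested_additions : Option (List String)) (reserve_capabilities : List String) (out : List String) : Decidable (Spec_sanitize_capability_additions_py requested_additions reserve_capabilities out) := by unfold Spec_sanitize_capability_additions_py; infer_instance

-- ===== CLAIM (what is proved, stated in full; the proofs are below) =====
def Claim_equal_sanitize_capability_additions_py : Prop := ∀ (requested_additions : Option (List String)) (reserve_capabilities : List String), Dom_sanitize_capability_additions_py requested_additions reserve_capabilities → Spec_sanitize_capability_additions_py requested_additions reserve_capabilities (sanitize_capability_additions_py requested_additions reserve_capabilities)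

-- ===== LEMMAS AND PROOFS =====

-- deleting x from a list already filtered against acc = filtering against acc ++ [x]
theorem filter_snoc_contains (acc : List String) (x : String) (ys : List String) :
    (ys.filter (fun y => !acc.contains y)).filter (fun y => y != x)
      = ys.filter (fun y => !((acc ++ [x]).contains y)) := by
  rw [List.filter_filter]
  apply List.filter_congr
  intro y _
  by_cases h : y = x <;> simp [h]

-- invariant: A's fused loop started at accumulator acc equals B's worklist loop run on the
-- input with every element already in acc deleted
theorem foldA_eq_pvBLoop (reserve : PySem.Set String) (xs acc : List String) :
    xs.foldl
      (fun additions k =>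
        if reserve.contains k && !(additions.contains k) then additions ++ [k] else additions)
      acc
      = pvBLoop reserve (xs.filter (fun y => !acc.contains y)) acc := by
  induction xs generalizing acc with
  | nil => simp [pvBLoop]
  | cons x xs ih =>
    simp only [List.foldl_cons, List.filter_cons]
    by_cases hin : acc.contains x = true
    · -- x already emitted: A skips it and B's worklist never contains it
      simp only [hin, Bool.not_true, Bool.and_false, Bool.false_eq_true, if_false]
      exact ih acc
    · have hin' : acc.contains x = false := by simpa using hin
      simp only [hin', Bool.not_false, Bool.and_true]
      by_cases hp : reserve.contains x = true
      · rw [if_pos hp]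
        simp only [if_true]
        rw [pvBLoop, if_pos hp, ih (acc ++ [x]), filter_snoc_contains]
      · rw [if_neg hp]
        simp only [if_true]
        rw [pvBLoop, if_neg hp]
        exact ih acc

-- ===== VERDICT (by name: the statement is the Claim_ definition above) =====
theorem sanitize_capability_additions_py_spec : Claim_equal_sanitize_capability_additions_py := by
  intro requested_additions reserve_capabilities _hdom
  unfold Spec_sanitize_capability_additions_py
  unfold sanitize_capability_additions_py sanitize_capability_additions_py_alt
  rw [foldA_eq_pvBLoop]
  simp
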